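-- pv_equiv track=rewrite | github.com/emanuelfeld/advent-of-code | 11/11.py | hex_position
-- ===== SOURCE A (Python) =====
-- def hex_position(moves):
--     x,y,z = 0, 0, 0
--     for mv in moves:
--         if mv == 'n':
--             x += 1
--             y -= 1
--         elif mv == 's':
--             x -= 1
--             y += 1
--         elif mv == 'nw':
--             x += 1
--             z -= 1
--         elif mv == 'ne':
--             y -= 1
--             z += 1
--         elif mv == 'sw':
--             y += 1
--             z -= 1
--         elif mv == 'se':
--             x -= 1
--             z += 1
--         yield (x, y, z)
-- ===== SOURCE B (Python) =====
-- def hex_position(moves):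
--     # Position is a linear function of the multiset of moves seen so far:
--     # keep a frequency counter of move strings (no branching, no coordinate
--     # state) and derive (x, y, z) from the counts at each step.
--     cnt = {}
--     for mv in moves:
--         cnt[mv] = cnt.get(mv, 0) + 1
--         g = cnt.get
--         yield (g('n', 0) - g('s', 0) + g('nw', 0) - g('se', 0),
--                g('s', 0) - g('n', 0) + g('sw', 0) - g('ne', 0),
--                g('ne', 0) - g('nw', 0) + g('se', 0) - g('sw', 0))
-- ===== Notes on version B (the rewrite author's own statement) =====
-- stated objective: alternative
-- what changed: B keeps no coordinate state at all: it maintains a frequency counter of the move strings and derives each yielded position as a closed-form linear function of the six move counts, replacing A's branch-and-mutate coordinate loop.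
import Mathlib
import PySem

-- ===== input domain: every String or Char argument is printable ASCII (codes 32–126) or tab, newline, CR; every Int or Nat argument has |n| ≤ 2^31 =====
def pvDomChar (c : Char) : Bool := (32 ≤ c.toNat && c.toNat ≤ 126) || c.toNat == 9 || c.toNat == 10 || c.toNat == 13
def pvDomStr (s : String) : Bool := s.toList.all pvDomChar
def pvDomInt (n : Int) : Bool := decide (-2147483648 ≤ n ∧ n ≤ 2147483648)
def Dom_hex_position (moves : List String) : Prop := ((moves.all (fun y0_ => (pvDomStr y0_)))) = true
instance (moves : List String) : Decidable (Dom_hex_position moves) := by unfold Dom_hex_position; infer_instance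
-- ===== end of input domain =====

-- B keeps no coordinate state: it maintains a frequency counter of the move strings and
-- derives each position as a linear function of the six counts (objective: alternative).
-- A is a Python generator; both ports return the list of yielded positions.

-- ===== PORT A =====
-- the loop of A: carries (x, y, z), updates via the if/elif chain, yields after each move
def hexLoopA (x y z : Int) : List String → List (Int × Int × Int)
  | [] => []
  | mv :: rest =>
    let s : Int × Int × Int :=
      if mv = "n" then (x + 1, y - 1, z)
      else if mv = "s" then (x - 1, y + 1, z)
      else if mv = "nw" then (x + 1, y, z - 1)
      else if mv = "ne" then (x, y - 1, z + 1)
      else if mv = "sw" then (x, y + 1, z - 1)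
      else if mv = "se" then (x - 1, y, z + 1)
      else (x, y, z)
    s :: hexLoopA s.1 s.2.1 s.2.2 rest

def hex_position (moves : List String) : List (Int × Int × Int) :=
  hexLoopA 0 0 0 moves

-- ===== PORT B =====
-- the loop of Source B: cnt[mv] = cnt.get(mv, 0) + 1, then yield the linear formula of counts
def hexLoopB (cnt : PySem.Dict String Int) : List String → List (Int × Int × Int)
  | [] => []
  | mv :: rest =>
    let cnt' := cnt.insert mv (cnt.getD mv 0 + 1)
    let g : String → Int := fun k => cnt'.getD k 0
    (g "n" - g "s" + g "nw" - g "se",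
     g "s" - g "n" + g "sw" - g "ne",
     g "ne" - g "nw" + g "se" - g "sw") :: hexLoopB cnt' rest

def hex_position_alt (moves : List String) : List (Int × Int × Int) :=
  hexLoopB PySem.Dict.empty moves

-- ===== PRECONDITION & SPEC =====
def Spec_hex_position (moves : List String) (out : List (Int × Int × Int)) : Prop := out = hex_position_alt moves
instance (moves : List String) (out : List (Int × Int × Int)) : Decidable (Spec_hex_position moves out) := by unfold Spec_hex_position; infer_instance

-- ===== CLAIM =====
def Claim_equal_hex_position : Prop := ∀ (moves : List String), Dom_hex_position moves → Spec_hex_position moves (hex_position moves)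

-- ===== LEMMAS AND PROOFS =====

-- the three coordinates B derives from a counter
def cX (cnt : PySem.Dict String Int) : Int :=
  cnt.getD "n" 0 - cnt.getD "s" 0 + cnt.getD "nw" 0 - cnt.getD "se" 0
def cY (cnt : PySem.Dict String Int) : Int :=
  cnt.getD "s" 0 - cnt.getD "n" 0 + cnt.getD "sw" 0 - cnt.getD "ne" 0
def cZ (cnt : PySem.Dict String Int) : Int :=
  cnt.getD "ne" 0 - cnt.getD "nw" 0 + cnt.getD "se" 0 - cnt.getD "sw" 0

theorem hexLoop_eq (moves : List String) :
    ∀ (cnt : PySem.Dict String Int),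
      hexLoopA (cX cnt) (cY cnt) (cZ cnt) moves = hexLoopB cnt moves := by
  induction moves with
  | nil => intro cnt; rfl
  | cons mv rest ih =>
    intro cnt
    simp only [hexLoopA, hexLoopB]
    have key : (if mv = "n" then (cX cnt + 1, cY cnt - 1, cZ cnt)
        else if mv = "s" then (cX cnt - 1, cY cnt + 1, cZ cnt)
        else if mv = "nw" then (cX cnt + 1, cY cnt, cZ cnt - 1)
        else if mv = "ne" then (cX cnt, cY cnt - 1, cZ cnt + 1)
        else if mv = "sw" then (cX cnt, cY cnt + 1, cZ cnt - 1)
        else if mv = "se" then (cX cnt - 1, cY cnt, cZ cnt + 1)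
        else (cX cnt, cY cnt, cZ cnt) : Int × Int × Int)
        = (cX (cnt.insert mv (cnt.getD mv 0 + 1)),
           cY (cnt.insert mv (cnt.getD mv 0 + 1)),
           cZ (cnt.insert mv (cnt.getD mv 0 + 1))) := by
      have e : ∀ k : String, mv ≠ k → (k = mv) = False := fun k h => by
        simp [Ne.symm h]
      split_ifs with h1 h2 h3 h4 h5 h6
      · subst h1; simp [cX, cY, cZ, PySem.Dict.getD_insert]; constructor <;> omega
      · subst h2; simp [cX, cY, cZ, PySem.Dict.getD_insert, e _ h1]; constructor <;> omega
      · subst h3; simp [cX, cY, cZ, PySem.Dict.getD_insert, e _ h1, e _ h2]; constructor <;> omega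
      · subst h4; simp [cX, cY, cZ, PySem.Dict.getD_insert, e _ h1, e _ h2, e _ h3]; constructor <;> omega
      · subst h5; simp [cX, cY, cZ, PySem.Dict.getD_insert, e _ h1, e _ h2, e _ h3, e _ h4]; constructor <;> omega
      · subst h6; simp [cX, cY, cZ, PySem.Dict.getD_insert, e _ h1, e _ h2, e _ h3, e _ h4, e _ h5]; constructor <;> omega
      · simp [cX, cY, cZ, PySem.Dict.getD_insert, e _ h1, e _ h2, e _ h3, e _ h4, e _ h5, e _ h6]
    rw [key]
    have := ih (cnt.insert mv (cnt.getD mv 0 + 1))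
    exact congrArg₂ List.cons rfl this

-- ===== VERDICT =====
theorem hex_position_spec : Claim_equal_hex_position := by
  intro moves _
  unfold Spec_hex_position hex_position hex_position_alt
  have h := hexLoop_eq moves PySem.Dict.empty
  simpa [cX, cY, cZ, PySem.Dict.getD, PySem.Dict.get?, PySem.Dict.empty] using h
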